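-- pv_equiv track=rewrite | github.com/Margarita01991/HelloPhyton | Homework7/model.py | find_contact
-- ===== SOURCE A (Python) =====
-- def find_contact(book,req):# (book:list,req: str) -> str:
--     a = ''
--     for i in book:
--         if i.find(req) != -1:
--             a = i
--     if a == '':
--         return 'Empty'
--     else:
--         return a
-- ===== SOURCE B (Python) =====
-- def find_contact(book, req):
--     for contact in reversed(book):
--         if req in contact:
--             return contact
--     return 'Empty'
-- ===== Notes on version B (the rewrite author's own statement) =====
-- stated objective: alternative
-- what changed: B scans the book in reverse and returns the first hit immediately (early exit, no accumulated state) instead of A's forward pass that always traverses the whole list overwriting an accumulator and decodes a sentinel afterwards.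
-- intended difference: When req is '' and the last contact is the empty string, A's '' sentinel collides with the matched contact and A returns 'Empty' although a matching contact exists; B returns that contact '', the actual last match, which is the intended value. — e.g. on find_contact([""], ""): A returns "Empty", B returns ""
import Mathlib
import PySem

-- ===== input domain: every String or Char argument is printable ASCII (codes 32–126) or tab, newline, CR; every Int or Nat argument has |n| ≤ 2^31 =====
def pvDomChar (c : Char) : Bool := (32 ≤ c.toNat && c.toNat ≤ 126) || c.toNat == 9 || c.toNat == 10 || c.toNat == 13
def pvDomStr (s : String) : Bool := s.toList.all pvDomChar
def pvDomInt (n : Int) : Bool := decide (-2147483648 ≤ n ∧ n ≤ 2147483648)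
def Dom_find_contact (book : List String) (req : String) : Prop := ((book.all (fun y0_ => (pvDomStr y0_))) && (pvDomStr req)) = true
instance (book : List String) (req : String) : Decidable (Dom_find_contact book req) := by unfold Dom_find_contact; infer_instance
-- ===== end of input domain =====

-- B scans the book in reverse and returns the first hit (early exit, no accumulator)
-- instead of A's forward overwrite-and-decode-sentinel pass; on req = '' with a
-- trailing '' contact A's sentinel collides and the results differ (see D_ below).

-- ===== PORT A =====
def find_contact (book : List String) (req : String) : String :=
  let a := book.foldl (fun a i => if PySem.Str.find i req ≠ -1 then i else a) ""
  if a = "" then "Empty" else a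

-- ===== PORT B =====
def find_contact_altRev (req : String) : List String → String
  | [] => "Empty"
  | contact :: rest =>
    if PySem.Str.isIn req contact then contact
    else find_contact_altRev req rest

def find_contact_alt (book : List String) (req : String) : String :=
  find_contact_altRev req book.reverse

-- ===== PRECONDITION & SPEC =====
-- When req is '' and the last contact is '', A's '' sentinel collides with the matched
-- contact and A returns 'Empty' although a matching contact exists; B returns that
-- contact '', the actual last match, which is the intended value.
def D_find_contact (book : List String) (req : String) : Prop :=
  req = "" ∧ book.getLast? = some ""
instance (book : List String) (req : String) : Decidable (D_find_contact book req) := by unfold D_find_contact; infer_instance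

def Spec_find_contact (book : List String) (req : String) (out : String) : Prop := ¬ D_find_contact book req → out = find_contact_alt book req
instance (book : List String) (req : String) (out : String) : Decidable (Spec_find_contact book req out) := by unfold Spec_find_contact; infer_instance

def pvDiffWitness_find_contact : List String × String := ([""], "")
def pvDiffWitnessOut_find_contact : String × String := ("Empty", "")

-- ===== CLAIM (what is proved, stated in full; the proofs are below) =====
def Claim_unchanged_find_contact : Prop := ∀ (book : List String) (req : String), Dom_find_contact book req → Spec_find_contact book req (find_contact book req)
def Claim_changed_find_contact : Prop := Dom_find_contact (pvDiffWitness_find_contact.1) (pvDiffWitness_find_contact.2) ∧ D_find_contact (pvDiffWitness_find_contact.1) (pvDiffWitness_find_contact.2) ∧ find_contact (pvDiffWitness_find_contact.1) (pvDiffWitness_find_contact.2) = pvDiffWitnessOut_find_contact.1 ∧ find_contact_alt (pvDiffWitness_find_contact.1) (pvDiffWitness_find_contact.2) = pvDiffWitnessOut_find_contact.2 ∧ pvDiffWitnessOut_find_contact.1 ≠ pvDiffWitnessOut_find_contact.2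
def Claim_exact_find_contact : Prop := ∀ (book : List String) (req : String), Dom_find_contact book req → D_find_contact book req → find_contact book req ≠ find_contact_alt book req

-- ===== LEMMAS AND PROOFS =====

-- a matching contact is nonempty unless req itself is empty
lemma match_nonempty {x req : String} (h : PySem.Str.find x req ≠ -1) (hreq : req ≠ "") :
    x ≠ "" := by
  intro hx
  subst hx
  rw [PySem.Str.find_ne_neg_one_iff] at h
  have : req.toList = [] := List.eq_nil_of_infix_nil h
  exact hreq (by cases req; simpa using this)

-- main agreement lemma, for req ≠ ""
lemma key_ne (req : String) (hreq : req ≠ "") (book : List String) :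
    find_contact book req = find_contact_alt book req := by
  induction book using List.reverseRecOn with
  | nil => rfl
  | append_singleton xs x ih =>
    simp only [find_contact, find_contact_alt, List.foldl_append, List.foldl_cons,
      List.foldl_nil, List.reverse_append, List.reverse_singleton, List.singleton_append,
      find_contact_altRev] at *
    by_cases h : PySem.Str.find x req = -1
    · have h' : ¬ PySem.Str.isIn req x = true := by
        rw [PySem.Str.isIn_iff_infix]
        exact (PySem.Str.find_eq_neg_one_iff _ _).mp h
      rw [if_neg (not_not_intro h), if_neg h']
      exact ih
    · have hx : x ≠ "" := match_nonempty h hreq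
      rw [if_pos h, if_neg hx,
        if_pos ((PySem.Str.isIn_iff_infix _ _).mpr ((PySem.Str.find_ne_neg_one_iff _ _).mp h))]

-- with req = "", every contact matches
lemma isIn_empty (x : String) : PySem.Str.isIn "" x = true := by
  rw [PySem.Str.isIn_iff_infix]; simp

lemma find_empty_ne (x : String) : PySem.Str.find x "" ≠ -1 := by
  rw [PySem.Str.find_ne_neg_one_iff]; simp

-- with req = "", A's fold keeps the last element
lemma fold_empty (xs : List String) (a : String) :
    xs.foldl (fun a i => if PySem.Str.find i "" ≠ -1 then i else a) a = xs.getLast?.getD a := by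
  induction xs generalizing a with
  | nil => rfl
  | cons y ys ih =>
    rw [List.foldl_cons, if_pos (find_empty_ne y), ih y]
    cases ys with
    | nil => rfl
    | cons z zs =>
      cases hzz : (z :: zs).getLast? with
      | none => simp at hzz
      | some w => simp [List.getLast?_cons_cons, hzz]

-- with req = "", B returns the last element
lemma alt_empty (book : List String) :
    find_contact_alt book "" = book.getLast?.getD "Empty" := by
  unfold find_contact_alt
  induction book using List.reverseRecOn with
  | nil => rfl
  | append_singleton xs x ih =>
    rw [List.reverse_append, List.reverse_singleton, List.singleton_append,
      find_contact_altRev, if_pos (isIn_empty x)]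
    simp

lemma key (book : List String) (req : String) (hD : ¬ D_find_contact book req) :
    find_contact book req = find_contact_alt book req := by
  by_cases hreq : req = ""
  · subst hreq
    rw [alt_empty]
    unfold find_contact
    rw [fold_empty]
    unfold D_find_contact at hD
    cases hlast : book.getLast? with
    | none => simp
    | some y =>
      have hy : y ≠ "" := by rintro rfl; exact hD ⟨rfl, hlast⟩
      simp [hy]
  · exact key_ne req hreq book

-- ===== VERDICT (by name: the statement is the Claim_ definition above) =====
theorem find_contact_spec : Claim_unchanged_find_contact := by
  intro book req _ hD
  exact key book req hD

theorem find_contact_changed : Claim_changed_find_contact := by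
  unfold Claim_changed_find_contact; decide

theorem find_contact_tight : Claim_exact_find_contact := by
  intro book req _ hD
  obtain ⟨hreq, hlast⟩ := hD
  subst hreq
  rw [alt_empty, hlast]
  unfold find_contact
  rw [fold_empty, hlast]
  simp
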